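-- pv_equiv track=rewrite | github.com/ahmedomer13218/PizzaOrder_NLP-project | helper_functions.py | map_label_sequences
-- ===== SOURCE A (Python) =====
-- def map_label_sequences(labels):
--     sequence_map = {}
--     sequence_indices = []
--     current_index = 0
--
--     for label_seq in labels:
--         label_tuple = tuple(label_seq)
--
--         if label_tuple not in sequence_map:
--             sequence_map[label_tuple] = current_index
--             current_index += 1
--
--         sequence_indices.append(sequence_map[label_tuple])
--
--     return sequence_indices, sequence_map
-- ===== SOURCE B (Python) =====
-- def map_label_sequences(labels):
--     # Two-pass: build the table first (index = current table size), then translate.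
--     sequence_map = {}
--     for label_seq in labels:
--         t = tuple(label_seq)
--         if t not in sequence_map:
--             sequence_map[t] = len(sequence_map)
--     sequence_indices = [sequence_map[tuple(s)] for s in labels]
--     return sequence_indices, sequence_map
-- ===== Notes on version B (the rewrite author's own statement) =====
-- stated objective: alternative
-- what changed: The fused accumulate-and-translate loop (with an explicit current_index counter) is split into a build-table pass that assigns len(sequence_map) as each new index and a separate translation comprehension.
import Mathlib
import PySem

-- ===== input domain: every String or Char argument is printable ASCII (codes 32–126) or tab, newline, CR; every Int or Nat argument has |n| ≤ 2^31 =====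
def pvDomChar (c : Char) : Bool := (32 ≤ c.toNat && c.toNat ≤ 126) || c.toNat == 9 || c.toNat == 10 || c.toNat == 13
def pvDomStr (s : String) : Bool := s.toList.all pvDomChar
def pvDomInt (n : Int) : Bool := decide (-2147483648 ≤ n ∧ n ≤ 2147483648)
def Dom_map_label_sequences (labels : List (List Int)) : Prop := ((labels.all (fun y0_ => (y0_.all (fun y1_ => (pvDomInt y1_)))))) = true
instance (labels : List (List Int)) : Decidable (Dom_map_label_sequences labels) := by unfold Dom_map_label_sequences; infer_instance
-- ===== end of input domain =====

-- B splits A's fused accumulate-and-translate loop (with an explicit counter) into a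
-- build-table pass (index = current table size) plus a separate translation pass; alternative decomposition, same cost.

-- ===== PORT A =====
-- one iteration of A's single fused loop, state = (sequence_map, sequence_indices, current_index)
def mlsStepA (st : PySem.Dict (List Int) Int × List Int × Int) (seq : List Int) :
    PySem.Dict (List Int) Int × List Int × Int :=
  let m := st.1
  let idxs := st.2.1
  let cur := st.2.2
  let m' := if m.contains seq then m else m.insert seq cur
  let cur' := if m.contains seq then cur else cur + 1
  (m', idxs ++ [m'.getD seq 0], cur')

def map_label_sequences (labels : List (List Int)) : List Int × (List (List Int × Int)) :=
  let st := labels.foldl mlsStepA (PySem.Dict.empty, [], 0)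
  (st.2.1, st.1.items)

-- ===== PORT B =====
-- pass 1 of B: build only the table, a new key gets index = current table size
def mlsBuild (labels : List (List Int)) (m : PySem.Dict (List Int) Int) : PySem.Dict (List Int) Int :=
  labels.foldl (fun m s => if m.contains s then m else m.insert s (m.size : Int)) m

def map_label_sequences_alt (labels : List (List Int)) : List Int × (List (List Int × Int)) :=
  let m := mlsBuild labels PySem.Dict.empty
  (labels.map (fun s => m.getD s 0), m.items)

-- ===== PRECONDITION & SPEC =====
def Spec_map_label_sequences (labels : List (List Int)) (out : List Int × (List (List Int × Int))) : Prop := out = map_label_sequences_alt labels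
instance (labels : List (List Int)) (out : List Int × (List (List Int × Int))) : Decidable (Spec_map_label_sequences labels out) := by unfold Spec_map_label_sequences; infer_instance

-- ===== CLAIM (what is proved, stated in full; the proofs are below) =====
def Claim_equal_map_label_sequences : Prop := ∀ (labels : List (List Int)), Dom_map_label_sequences labels → Spec_map_label_sequences labels (map_label_sequences labels)

-- ===== LEMMAS AND PROOFS =====

-- B's build pass only adds fresh keys: existing lookups are preserved
lemma mlsBuild_getD_of_contains (ls : List (List Int)) (m : PySem.Dict (List Int) Int)
    (k : List Int) (h : m.contains k = true) :
    (mlsBuild ls m).getD k 0 = m.getD k 0 := by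
  induction ls generalizing m with
  | nil => rfl
  | cons s ls ih =>
    simp only [mlsBuild, List.foldl_cons] at *
    by_cases hs : m.contains s = true
    · simp [hs, ih m h]
    · simp only [Bool.not_eq_true] at hs
      simp only [hs, Bool.false_eq_true, if_false]
      have hk : (m.insert s (m.size : Int)).contains k = true := by
        simp [PySem.Dict.contains_insert, h]
      rw [ih _ hk, PySem.Dict.getD_insert]
      have : k ≠ s := fun he => by rw [he] at h; rw [h] at hs; exact absurd hs (by simp)
      simp [this]

-- the fused loop of A, started with current_index = size of the table, equals B's two passes
lemma mls_main (ls : List (List Int)) (m : PySem.Dict (List Int) Int) (idxs : List Int) :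
    ls.foldl mlsStepA (m, idxs, (m.size : Int)) =
      (mlsBuild ls m, idxs ++ ls.map (fun s => (mlsBuild ls m).getD s 0),
        ((mlsBuild ls m).size : Int)) := by
  induction ls generalizing m idxs with
  | nil => simp [mlsBuild]
  | cons s ls ih =>
    by_cases hs : m.contains s = true
    · have hb : mlsBuild (s :: ls) m = mlsBuild ls m := by
        simp [mlsBuild, hs]
      simp only [List.foldl_cons, mlsStepA, hs, if_pos]
      rw [ih m (idxs ++ [m.getD s 0])]
      rw [hb]
      simp [mlsBuild_getD_of_contains ls m s hs]
    · have hs' : m.contains s = false := by simpa using hs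
      have hb : mlsBuild (s :: ls) m = mlsBuild ls (m.insert s (m.size : Int)) := by
        simp [mlsBuild, hs']
      have hsz : ((m.insert s (m.size : Int)).size : Int) = (m.size : Int) + 1 := by
        rw [PySem.Dict.size_insert]
        simp [hs']
      simp only [List.foldl_cons, mlsStepA, hs', Bool.false_eq_true, if_false]
      rw [← hsz, ih (m.insert s (m.size : Int)) (idxs ++ [(m.insert s (m.size : Int)).getD s 0])]
      rw [hb]
      have hc : (m.insert s (m.size : Int)).contains s = true := by
        simp
      simp [mlsBuild_getD_of_contains ls _ s hc]

-- ===== VERDICT (by name: the statement is the Claim_ definition above) =====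
theorem map_label_sequences_spec : Claim_equal_map_label_sequences := by
  intro labels _
  unfold Spec_map_label_sequences map_label_sequences map_label_sequences_alt
  have h := mls_main labels PySem.Dict.empty []
  simp only [PySem.Dict.size_empty, Int.natCast_zero] at h
  simp only [h, List.nil_append]
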